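-- pv_equiv track=rewrite | github.com/sostenesfreitas/pull-tracker-czn | leitor_cache.py | filtrar_urls_relevantes
-- ===== SOURCE A (Python) =====
-- def filtrar_urls_relevantes(todas_urls: list) -> list:
--     """
--     Filtra e pontua URLs por relevância para a API de gacha/pulls.
--     Retorna lista ordenada do mais relevante ao menos.
--     """
--     palavras_chave = [
--         "rescue", "gacha", "pull", "record", "history",
--         "authkey", "token", "uid", "game_biz",
--     ]
--
--     pontuadas = []
--     for url in todas_urls:
--         url_lower = url.lower()
--         pontos = sum(2 if kw in url_lower else 0 for kw in palavras_chave)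
--
--         # URLs com parâmetros (query string) são mais prováveis
--         if "?" in url and "&" in url:
--             pontos += 3
--
--         if pontos > 0:
--             pontuadas.append((pontos, url))
--
--     pontuadas.sort(key=lambda x: -x[0])
--     return [url for _, url in pontuadas]
-- ===== SOURCE B (Python) =====
-- def filtrar_urls_relevantes(todas_urls: list) -> list:
--     """Bucket-sort re-implementation: distribute positive-scoring URLs into
--     per-score buckets, then concatenate buckets from the highest score down."""
--     palavras_chave = [
--         "rescue", "gacha", "pull", "record", "history",
--         "authkey", "token", "uid", "game_biz",
--     ]
--
--     buckets = {}
--     for url in todas_urls: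
--         url_lower = url.lower()
--         pontos = 0
--         for kw in palavras_chave:
--             if kw in url_lower:
--                 pontos += 2
--         if "?" in url and "&" in url:
--             pontos += 3
--
--         if pontos > 0:
--             buckets.setdefault(pontos, []).append(url)
--
--     resultado = []
--     for s in range(21, 0, -1):
--         if s in buckets:
--             resultado.extend(buckets[s])
--     return resultado
-- ===== Notes on version B (the rewrite author's own statement) =====
-- stated objective: alternative
-- what changed: Replaces build-pairs-then-comparison-sort with a single-pass bucket sort: URLs are appended to per-score buckets (score range is bounded by 2*9+3=21) and the result is the concatenation of buckets from score 21 down to 1, which reproduces the stable descending order without any sort.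
import Mathlib
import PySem

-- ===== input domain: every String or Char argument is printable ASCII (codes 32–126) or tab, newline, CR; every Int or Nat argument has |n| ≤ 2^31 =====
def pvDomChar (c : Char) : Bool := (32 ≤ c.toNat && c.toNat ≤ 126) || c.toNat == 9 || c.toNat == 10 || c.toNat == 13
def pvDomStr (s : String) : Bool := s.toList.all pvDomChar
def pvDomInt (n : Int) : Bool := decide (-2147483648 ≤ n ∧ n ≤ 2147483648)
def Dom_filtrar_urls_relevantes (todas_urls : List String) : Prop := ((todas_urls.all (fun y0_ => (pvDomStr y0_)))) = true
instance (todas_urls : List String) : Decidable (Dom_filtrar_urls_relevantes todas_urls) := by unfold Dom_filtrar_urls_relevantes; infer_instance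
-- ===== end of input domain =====

-- B replaces build-(score,url)-pairs-then-stable-sort by a single pass into per-score
-- buckets (scores are bounded by 21) concatenated from the highest score down (alternative
-- decomposition; same return value).

-- ===== PORT A =====
def pvPalavrasChave : List String :=
  ["rescue", "gacha", "pull", "record", "history", "authkey", "token", "uid", "game_biz"]

def filtrar_urls_relevantes (todas_urls : List String) : List String :=
  let pontuadas : List (Int × String) := todas_urls.foldl (fun acc url =>
    let url_lower := PySem.Str.lower url
    let pontos : Int :=
      (pvPalavrasChave.map (fun kw => if PySem.Str.isIn kw url_lower then (2 : Int) else 0)).sum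
    let pontos := if PySem.Str.isIn "?" url && PySem.Str.isIn "&" url then pontos + 3 else pontos
    if pontos > 0 then acc ++ [(pontos, url)] else acc) []
  let pontuadas := PySem.List.sorted pontuadas (fun x => -x.1)
  pontuadas.map (fun p => p.2)

-- ===== PORT B =====
def filtrar_urls_relevantes_alt (todas_urls : List String) : List String :=
  let buckets : PySem.Dict Int (List String) := todas_urls.foldl (fun d url =>
    let url_lower := PySem.Str.lower url
    let pontos : Int :=
      pvPalavrasChave.foldl (fun p kw => if PySem.Str.isIn kw url_lower then p + 2 else p) 0
    let pontos := if PySem.Str.isIn "?" url && PySem.Str.isIn "&" url then pontos + 3 else pontos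
    if pontos > 0 then d.modify pontos [] (fun l => l ++ [url]) else d) PySem.Dict.empty
  (PySem.List.pyRange 21 0 (-1)).foldl (fun resultado s =>
    if buckets.contains s then resultado ++ buckets.getD s [] else resultado) []

-- ===== PRECONDITION & SPEC =====
def Spec_filtrar_urls_relevantes (todas_urls : List String) (out : List String) : Prop := out = filtrar_urls_relevantes_alt todas_urls
instance (todas_urls : List String) (out : List String) : Decidable (Spec_filtrar_urls_relevantes todas_urls out) := by unfold Spec_filtrar_urls_relevantes; infer_instance

-- ===== CLAIM (what is proved, stated in full; the proofs are below) =====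
def Claim_equal_filtrar_urls_relevantes : Prop := ∀ (todas_urls : List String), Dom_filtrar_urls_relevantes todas_urls → Spec_filtrar_urls_relevantes todas_urls (filtrar_urls_relevantes todas_urls)

-- ===== LEMMAS AND PROOFS =====

-- The common score of a URL (written in B's foldl form).
def pvScore (url : String) : Int :=
  let url_lower := PySem.Str.lower url
  let pontos : Int :=
    pvPalavrasChave.foldl (fun p kw => if PySem.Str.isIn kw url_lower then p + 2 else p) 0
  if PySem.Str.isIn "?" url && PySem.Str.isIn "&" url then pontos + 3 else pontos

-- The scored pairs both programs conceptually build.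
def pvPont (todas_urls : List String) : List (Int × String) :=
  (todas_urls.filter (fun u => decide (pvScore u > 0))).map (fun u => (pvScore u, u))

def pvDesc : List Int := PySem.List.pyRange 21 0 (-1)

theorem pvDesc_lit : pvDesc = [21,20,19,18,17,16,15,14,13,12,11,10,9,8,7,6,5,4,3,2,1] := by decide

theorem pvDesc_def : PySem.List.pyRange 21 0 (-1) = pvDesc := rfl

-- A's map-sum score equals B's foldl score.
theorem pv_score_fold (c : String → Bool) (kws : List String) (p : Int) :
    kws.foldl (fun p kw => if c kw then p + 2 else p) p
      = p + (kws.map (fun kw => if c kw then (2 : Int) else 0)).sum := by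
  induction kws generalizing p with
  | nil => simp
  | cons k ks ih =>
    simp only [List.foldl_cons, List.map_cons, List.sum_cons, ih]
    split_ifs <;> ring

theorem pv_score_bounds (c : String → Bool) (kws : List String) (p : Int) :
    p ≤ kws.foldl (fun p kw => if c kw then p + 2 else p) p ∧
      kws.foldl (fun p kw => if c kw then p + 2 else p) p ≤ p + 2 * kws.length := by
  induction kws generalizing p with
  | nil => simp
  | cons k ks ih =>
    simp only [List.foldl_cons, List.length_cons]
    rcases ih (if c k then p + 2 else p) with ⟨h1, h2⟩
    constructor
    · refine le_trans ?_ h1; split_ifs <;> omega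
    · refine le_trans h2 ?_; split_ifs <;> push_cast <;> omega

theorem pvScore_mem_desc (u : String) (h : pvScore u > 0) : pvScore u ∈ pvDesc := by
  have hb := pv_score_bounds (fun kw => PySem.Str.isIn kw (PySem.Str.lower u)) pvPalavrasChave 0
  beta_reduce at hb
  rw [show pvPalavrasChave.length = 9 from rfl] at hb
  have hs : pvScore u = (if PySem.Str.isIn "?" u && PySem.Str.isIn "&" u then
      pvPalavrasChave.foldl (fun p kw => if PySem.Str.isIn kw (PySem.Str.lower u) then p + 2 else p) 0 + 3
    else pvPalavrasChave.foldl (fun p kw => if PySem.Str.isIn kw (PySem.Str.lower u) then p + 2 else p) 0) := rfl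
  rw [pvDesc_lit]
  simp only [List.mem_cons, List.not_mem_nil, or_false]
  rw [hs] at h ⊢
  split_ifs at h ⊢ <;> omega

-- insertion skips a prefix none of whose elements the new element goes before
theorem pv_insert_skip {α : Type} (before : α → α → Bool) (x : α) (ys zs : List α)
    (h : ∀ y ∈ ys, before x y = false) :
    PySem.List.insertBy before x (ys ++ zs) = ys ++ PySem.List.insertBy before x zs := by
  induction ys with
  | nil => rfl
  | cons y ys ih =>
    have hy := h y (by simp)
    simp only [List.cons_append, PySem.List.insertBy, hy, Bool.false_eq_true, if_false,
      List.cons.injEq, true_and]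
    exact ih fun a ha => h a (by simp [ha])

-- inserting x between the not-before part and the strictly-smaller-key part
theorem pv_insert_mid {α : Type} (x : Int × α) (ys zs : List (Int × α))
    (hys : ∀ y ∈ ys, ¬(y.1 < x.1)) (hzs : ∀ z ∈ zs, z.1 < x.1) :
    PySem.List.insertBy (fun a b => decide ((-a.1 : Int) < -b.1)) x (ys ++ zs)
      = ys ++ x :: zs := by
  rw [pv_insert_skip _ x ys zs (by
    intro y hy
    simp only [decide_eq_false_iff_not, not_lt]
    have := hys y hy; omega)]
  cases zs with
  | nil => simp [PySem.List.insertBy]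
  | cons z zs =>
    have hlt : (-x.1 : Int) < -z.1 := by have := hzs z (by simp); omega
    simp [PySem.List.insertBy, hlt]

-- inserting into a descending bucket concatenation appends to the right bucket
theorem pv_insert_flatMap {α : Type} (x : Int × α) (desc : List Int)
    (F : Int → List (Int × α)) (hd : desc.Pairwise (· > ·)) (hx : x.1 ∈ desc)
    (hF : ∀ s ∈ desc, ∀ y ∈ F s, y.1 = s) :
    PySem.List.insertBy (fun a b => decide ((-a.1 : Int) < -b.1)) x (desc.flatMap F)
      = desc.flatMap (fun s => F s ++ if x.1 = s then [x] else []) := by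
  induction desc with
  | nil => cases hx
  | cons d rest ih =>
    rw [List.pairwise_cons] at hd
    simp only [List.flatMap_cons]
    by_cases hxd : x.1 = d
    · have hys : ∀ y ∈ F d, ¬(y.1 < x.1) := by
        intro y hy
        rw [hF d (by simp) y hy, hxd]; omega
      have hzs : ∀ z ∈ rest.flatMap F, z.1 < x.1 := by
        intro z hz
        rcases List.mem_flatMap.mp hz with ⟨s, hs, hzF⟩
        rw [hF s (by simp [hs]) z hzF, hxd]
        exact hd.1 s hs
      rw [pv_insert_mid x (F d) (rest.flatMap F) hys hzs]
      have hrest : rest.flatMap (fun s => F s ++ if x.1 = s then [x] else [])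
          = rest.flatMap F := by
        refine List.flatMap_congr (fun s hs => ?_)
        have hne : x.1 ≠ s := by have := hd.1 s hs; omega
        simp [hne]
      rw [hrest, if_pos hxd]
      simp
    · have hxr : x.1 ∈ rest := by
        rcases List.mem_cons.mp hx with h | h
        · exact absurd h hxd
        · exact h
      rw [pv_insert_skip _ x (F d) (rest.flatMap F) (by
        intro y hy
        have hyk := hF d (by simp) y hy
        have hlt : x.1 < d := hd.1 x.1 hxr
        simp only [decide_eq_false_iff_not, not_lt, hyk]
        omega)]
      rw [ih hd.2 hxr (fun s hs => hF s (by simp [hs])), if_neg hxd]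
      simp

-- the stable sort of a bounded-key list is the descending bucket concatenation
theorem pv_sorted_buckets (l : List (Int × String)) (hl : ∀ p ∈ l, p.1 ∈ pvDesc) :
    PySem.List.sorted l (fun x => -x.1)
      = pvDesc.flatMap (fun s => l.filter (fun p => p.1 == s)) := by
  induction l using List.reverseRecOn with
  | nil =>
    rw [pvDesc_lit]
    decide
  | append_singleton l x ih =>
    rw [PySem.List.sorted_eq_foldl_insertBy, List.foldl_append, List.foldl_cons,
      List.foldl_nil, ← PySem.List.sorted_eq_foldl_insertBy]
    rw [ih (fun p hp => hl p (by simp [hp]))]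
    rw [pv_insert_flatMap x pvDesc _ (by rw [pvDesc_lit]; decide)
      (hl x (by simp))
      (fun s _ y hy => beq_iff_eq.mp (List.mem_filter.mp hy).2)]
    refine List.flatMap_congr (fun s _ => ?_)
    rw [List.filter_append]
    congr 1
    by_cases h : x.1 = s
    · simp [List.filter, h]
    · have hb : (x.1 == s) = false := beq_eq_false_iff_ne.mpr h
      simp [List.filter, hb, h]

-- characterization of A
theorem pvA_eq (todas_urls : List String) :
    filtrar_urls_relevantes todas_urls
      = (PySem.List.sorted (pvPont todas_urls) (fun x => -x.1)).map (fun p => p.2) := by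
  have hfun : (fun (acc : List (Int × String)) url =>
      let url_lower := PySem.Str.lower url
      let pontos : Int :=
        (pvPalavrasChave.map (fun kw => if PySem.Str.isIn kw url_lower then (2 : Int) else 0)).sum
      let pontos := if PySem.Str.isIn "?" url && PySem.Str.isIn "&" url then pontos + 3 else pontos
      if pontos > 0 then acc ++ [(pontos, url)] else acc)
      = fun acc url => if pvScore url > 0 then acc ++ [(pvScore url, url)] else acc := by
    funext acc url
    have hs : pvScore url = (if PySem.Str.isIn "?" url && PySem.Str.isIn "&" url then
        (pvPalavrasChave.map (fun kw => if PySem.Str.isIn kw (PySem.Str.lower url) then (2 : Int) else 0)).sum + 3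
      else
        (pvPalavrasChave.map (fun kw => if PySem.Str.isIn kw (PySem.Str.lower url) then (2 : Int) else 0)).sum) := by
      show (if PySem.Str.isIn "?" url && PySem.Str.isIn "&" url then
          pvPalavrasChave.foldl (fun p kw => if PySem.Str.isIn kw (PySem.Str.lower url) then p + 2 else p) 0 + 3
        else
          pvPalavrasChave.foldl (fun p kw => if PySem.Str.isIn kw (PySem.Str.lower url) then p + 2 else p) 0) = _
      rw [pv_score_fold (fun kw => PySem.Str.isIn kw (PySem.Str.lower url)) pvPalavrasChave 0]
      simp
    show (if (if PySem.Str.isIn "?" url && PySem.Str.isIn "&" url then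
        (pvPalavrasChave.map (fun kw => if PySem.Str.isIn kw (PySem.Str.lower url) then (2 : Int) else 0)).sum + 3
      else
        (pvPalavrasChave.map (fun kw => if PySem.Str.isIn kw (PySem.Str.lower url) then (2 : Int) else 0)).sum) > 0
      then acc ++ [((if PySem.Str.isIn "?" url && PySem.Str.isIn "&" url then
        (pvPalavrasChave.map (fun kw => if PySem.Str.isIn kw (PySem.Str.lower url) then (2 : Int) else 0)).sum + 3
      else
        (pvPalavrasChave.map (fun kw => if PySem.Str.isIn kw (PySem.Str.lower url) then (2 : Int) else 0)).sum), url)]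
      else acc)
      = if pvScore url > 0 then acc ++ [(pvScore url, url)] else acc
    rw [hs]
  show (PySem.List.sorted
      (todas_urls.foldl (fun (acc : List (Int × String)) url =>
        let url_lower := PySem.Str.lower url
        let pontos : Int :=
          (pvPalavrasChave.map (fun kw => if PySem.Str.isIn kw url_lower then (2 : Int) else 0)).sum
        let pontos := if PySem.Str.isIn "?" url && PySem.Str.isIn "&" url then pontos + 3 else pontos
        if pontos > 0 then acc ++ [(pontos, url)] else acc) [])
      (fun x => -x.1)).map (fun p => p.2)
      = (PySem.List.sorted (pvPont todas_urls) (fun x => -x.1)).map (fun p => p.2)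
  rw [hfun, PySem.List.foldl_append_ite (p := fun u => pvScore u > 0)
    (f := fun u => (pvScore u, u))]
  rfl

-- the final loop of B concatenates the buckets in descending score order
theorem pv_outer (b : PySem.Dict Int (List String)) :
    (PySem.List.pyRange 21 0 (-1)).foldl
      (fun resultado s => if b.contains s then resultado ++ b.getD s [] else resultado) []
      = pvDesc.flatMap (fun s => b.getD s []) := by
  have hif : (fun (resultado : List String) s =>
      if b.contains s then resultado ++ b.getD s [] else resultado)
      = fun resultado s => resultado ++ b.getD s [] := by
    funext resultado s
    by_cases hc : b.contains s = true
    · simp [hc]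
    · rw [if_neg hc, PySem.Dict.getD_of_not_contains b ([] : List String) (by simpa using hc),
        List.append_nil]
  rw [hif, PySem.List.foldl_append_eq_flatMap, List.nil_append, pvDesc_def]

-- characterization of B
theorem pvB_eq (todas_urls : List String) :
    filtrar_urls_relevantes_alt todas_urls
      = (pvDesc.flatMap (fun s => (pvPont todas_urls).filter (fun p => p.1 == s))).map
          (fun p => p.2) := by
  have h1 : (fun (d : PySem.Dict Int (List String)) url =>
      let url_lower := PySem.Str.lower url
      let pontos : Int :=
        pvPalavrasChave.foldl (fun p kw => if PySem.Str.isIn kw url_lower then p + 2 else p) 0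
      let pontos := if PySem.Str.isIn "?" url && PySem.Str.isIn "&" url then pontos + 3 else pontos
      if pontos > 0 then d.modify pontos [] (fun l => l ++ [url]) else d)
      = fun (d : PySem.Dict Int (List String)) url =>
          if pvScore url > 0 then d.modify (pvScore url) [] (fun l => l ++ [url]) else d := rfl
  have hbuck : (todas_urls.foldl (fun (d : PySem.Dict Int (List String)) url =>
        if pvScore url > 0 then d.modify (pvScore url) [] (fun l => l ++ [url]) else d)
        PySem.Dict.empty)
      = (pvPont todas_urls).foldl (fun d p => d.modify p.1 [] (fun l => l ++ [p.2]))
          PySem.Dict.empty := by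
    rw [PySem.List.foldl_ite_eq_foldl_filter (p := fun u => pvScore u > 0)
      (f := fun (d : PySem.Dict Int (List String)) url =>
        d.modify (pvScore url) [] (fun l => l ++ [url]))]
    unfold pvPont
    rw [List.foldl_map]
  show (PySem.List.pyRange 21 0 (-1)).foldl
      (fun resultado s =>
        if (todas_urls.foldl (fun (d : PySem.Dict Int (List String)) url =>
            let url_lower := PySem.Str.lower url
            let pontos : Int :=
              pvPalavrasChave.foldl (fun p kw => if PySem.Str.isIn kw url_lower then p + 2 else p) 0
            let pontos := if PySem.Str.isIn "?" url && PySem.Str.isIn "&" url then pontos + 3 else pontos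
            if pontos > 0 then d.modify pontos [] (fun l => l ++ [url]) else d)
            PySem.Dict.empty).contains s
        then resultado ++ (todas_urls.foldl (fun (d : PySem.Dict Int (List String)) url =>
            let url_lower := PySem.Str.lower url
            let pontos : Int :=
              pvPalavrasChave.foldl (fun p kw => if PySem.Str.isIn kw url_lower then p + 2 else p) 0
            let pontos := if PySem.Str.isIn "?" url && PySem.Str.isIn "&" url then pontos + 3 else pontos
            if pontos > 0 then d.modify pontos [] (fun l => l ++ [url]) else d)
            PySem.Dict.empty).getD s []
        else resultado) []
      = _
  rw [h1, hbuck, pv_outer, List.map_flatMap]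
  refine List.flatMap_congr (fun s _ => ?_)
  rw [PySem.Dict.getD_foldl_modify_append]
  simp

-- ===== VERDICT (by name: the statement is the Claim_ definition above) =====
theorem filtrar_urls_relevantes_spec : Claim_equal_filtrar_urls_relevantes := by
  intro todas_urls _
  show filtrar_urls_relevantes todas_urls = filtrar_urls_relevantes_alt todas_urls
  rw [pvA_eq, pvB_eq]
  congr 1
  apply pv_sorted_buckets
  intro p hp
  unfold pvPont at hp
  rcases List.mem_map.mp hp with ⟨u, hu, rfl⟩
  exact pvScore_mem_desc u (by
    have := List.mem_filter.mp hu
    simpa using this.2)
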